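-- pv_equiv track=rewrite | github.com/AlexShem247/note-and-flashcard-maker | compile.py | simplify_imports
-- ===== SOURCE A (Python) =====
-- def simplify_imports(imports):
--     """Removes unnecessary import statements"""
--     simplified_imports = set()
--
--     for import_line in imports:
--         import_line = import_line.strip()
--
--         # Skip empty lines and comments
--         if not import_line or import_line.startswith('#'):
--             continue
--
--         # Skip imports of Python files
--         if "modules." in import_line:
--             continue
--
--         # Add the import line to the set of simplified imports
--         simplified_imports.add(import_line + "\n")
--
--     return sorted(simplified_imports)
-- ===== SOURCE B (Python) =====
-- def simplify_imports(imports):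
--     """Removes unnecessary import statements"""
--     lines = []
--     for line in imports:
--         line = line.strip()
--         if line and not line.startswith('#') and "modules." not in line:
--             lines.append(line + "\n")
--     lines.sort()
--     result = []
--     prev = None
--     for x in lines:
--         if x != prev:
--             result.append(x)
--             prev = x
--     return result
-- ===== Notes on version B (the rewrite author's own statement) =====
-- stated objective: alternative
-- what changed: B maintains no set: it appends passing lines to a plain list, sorts it, then removes adjacent duplicates in one linear pass with a prev variable, so deduplication comes from the sort order instead of hashing.
import Mathlib
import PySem

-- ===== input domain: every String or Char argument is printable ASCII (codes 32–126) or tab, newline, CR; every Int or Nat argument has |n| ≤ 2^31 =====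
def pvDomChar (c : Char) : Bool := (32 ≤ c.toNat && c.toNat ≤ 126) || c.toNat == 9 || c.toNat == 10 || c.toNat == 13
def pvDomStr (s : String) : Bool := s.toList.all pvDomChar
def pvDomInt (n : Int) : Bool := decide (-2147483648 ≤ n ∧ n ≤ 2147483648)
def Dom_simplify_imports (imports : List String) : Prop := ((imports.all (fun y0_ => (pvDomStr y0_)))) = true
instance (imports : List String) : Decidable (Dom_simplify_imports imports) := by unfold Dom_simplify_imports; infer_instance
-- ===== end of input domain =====

-- B keeps no set: it sorts the plain filtered list and drops adjacent duplicates in one pass.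

-- ===== PORT A =====
def simplify_imports (imports : List String) : List String :=
  let simplified_imports : PySem.Set String :=
    imports.foldl (fun simplified_imports import_line0 =>
      let import_line := PySem.Str.strip import_line0
      if import_line = "" ∨ PySem.Str.startswith import_line "#" = true then simplified_imports
      else if PySem.Str.isIn "modules." import_line = true then simplified_imports
      else PySem.Set.add simplified_imports (import_line ++ "\n")) PySem.Set.empty
  PySem.List.sorted simplified_imports (fun x => x) false

-- ===== PORT B =====
def simplify_imports_alt (imports : List String) : List String :=
  let lines : List String :=
    imports.foldl (fun lines line0 =>
      let line := PySem.Str.strip line0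
      if line ≠ "" ∧ PySem.Str.startswith line "#" = false ∧ PySem.Str.isIn "modules." line = false
      then lines ++ [line ++ "\n"] else lines) []
  let sortedLines := PySem.List.sorted lines (fun x => x) false
  (sortedLines.foldl (fun (st : List String × Option String) x =>
      if some x ≠ st.2 then (st.1 ++ [x], some x) else st) ([], none)).1

-- ===== PRECONDITION & SPEC =====
def Spec_simplify_imports (imports : List String) (out : List String) : Prop := out = simplify_imports_alt imports
instance (imports : List String) (out : List String) : Decidable (Spec_simplify_imports imports out) := by unfold Spec_simplify_imports; infer_instance

-- ===== CLAIM (what is proved, stated in full; the proofs are below) =====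
def Claim_equal_simplify_imports : Prop := ∀ (imports : List String), Dom_simplify_imports imports → Spec_simplify_imports imports (simplify_imports imports)

-- ===== LEMMAS AND PROOFS =====

-- recursive description of B's adjacent-dedup loop
def pvGo : Option String → List String → List String
  | _, [] => []
  | prev, x :: xs => if some x = prev then pvGo prev xs else x :: pvGo (some x) xs

theorem pvFold_eq_go (l : List String) : ∀ (out : List String) (prev : Option String),
    (l.foldl (fun (st : List String × Option String) x =>
      if some x ≠ st.2 then (st.1 ++ [x], some x) else st) (out, prev)).1
    = out ++ pvGo prev l := by
  induction l with
  | nil => intro out prev; simp [pvGo]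
  | cons x xs ih =>
    intro out prev
    simp only [List.foldl_cons]
    by_cases h : some x = prev
    · rw [if_neg (not_not_intro h), ih, pvGo, if_pos h]
    · rw [if_pos h, ih, pvGo, if_neg h, List.append_assoc]; rfl

-- A's set-building fold is Set.ofList of B's list-building fold
theorem pvSetFold_eq (l : List String) : ∀ (s : List String),
    (l.foldl (fun simplified_imports import_line0 =>
      let import_line := PySem.Str.strip import_line0
      if import_line = "" ∨ PySem.Str.startswith import_line "#" = true then simplified_imports
      else if PySem.Str.isIn "modules." import_line = true then simplified_imports
      else PySem.Set.add simplified_imports (import_line ++ "\n")) (PySem.Set.ofList s))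
    = PySem.Set.ofList (l.foldl (fun lines line0 =>
      let line := PySem.Str.strip line0
      if line ≠ "" ∧ PySem.Str.startswith line "#" = false ∧ PySem.Str.isIn "modules." line = false
      then lines ++ [line ++ "\n"] else lines) s) := by
  induction l with
  | nil => intro s; rfl
  | cons x xs ih =>
    intro s
    simp only [List.foldl_cons]
    by_cases h1 : PySem.Str.strip x = ""
    · rw [if_pos (Or.inl h1), if_neg (fun hc => hc.1 h1)]; exact ih s
    · by_cases h2 : PySem.Str.startswith (PySem.Str.strip x) "#" = true
      · rw [if_pos (Or.inr h2),
          if_neg (by intro hc; rw [hc.2.1] at h2; exact absurd h2 Bool.false_ne_true)]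
        exact ih s
      · by_cases h3 : PySem.Str.isIn "modules." (PySem.Str.strip x) = true
        · rw [if_neg (by intro hc; rcases hc with hc | hc; exacts [h1 hc, h2 hc]), if_pos h3,
            if_neg (by intro hc; rw [hc.2.2] at h3; exact absurd h3 Bool.false_ne_true)]
          exact ih s
        · rw [if_neg (by intro hc; rcases hc with hc | hc; exacts [h1 hc, h2 hc]), if_neg h3,
            if_pos ⟨h1, Bool.eq_false_iff.mpr h2, Bool.eq_false_iff.mpr h3⟩,
            ← PySem.Set.ofList_append_singleton]
          exact ih (s ++ [PySem.Str.strip x ++ "\n"])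

-- on a sorted list, the prev-loop keeps exactly the distinct elements, strictly increasing
theorem pvGo_spec (l : List String) : ∀ (prev : Option String),
    l.Pairwise (· ≤ ·) → (∀ y ∈ l, ∀ p, prev = some p → p ≤ y) →
    (∀ z, z ∈ pvGo prev l ↔ z ∈ l ∧ prev ≠ some z) ∧
    (pvGo prev l).Pairwise (· < ·) ∧
    (∀ z ∈ pvGo prev l, ∀ p, prev = some p → p < z) := by
  induction l with
  | nil => intro prev _ _; simp [pvGo]
  | cons x xs ih =>
    intro prev hpw hinv
    obtain ⟨hx, hxs⟩ := List.pairwise_cons.mp hpw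
    obtain ⟨hmem, hpwlt, hlow⟩ := ih (some x) hxs
      (by rintro y hy p hp; obtain rfl := Option.some_inj.mp hp; exact hx y hy)
    by_cases h : some x = prev
    · subst h
      rw [pvGo, if_pos rfl]
      refine ⟨fun z => ?_, hpwlt, hlow⟩
      rw [hmem z]
      constructor
      · rintro ⟨hz, hne⟩; exact ⟨List.mem_cons_of_mem _ hz, hne⟩
      · rintro ⟨hz, hne⟩
        rcases List.mem_cons.mp hz with rfl | hz
        · exact absurd rfl hne
        · exact ⟨hz, hne⟩
    · rw [pvGo, if_neg h]
      refine ⟨fun z => ?_, ?_, ?_⟩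
      · constructor
        · intro hz
          rcases List.mem_cons.mp hz with rfl | hz
          · exact ⟨List.mem_cons_self, fun hc => h hc.symm⟩
          · obtain ⟨hz', hne⟩ := (hmem z).mp hz
            refine ⟨List.mem_cons_of_mem _ hz', fun hpz => ?_⟩
            have hzx : z ≤ x := hinv x List.mem_cons_self z hpz
            have hxz : x ≤ z := hx z hz'
            have hzex : z = x := le_antisymm hzx hxz
            exact h (by rw [hpz, hzex])
        · rintro ⟨hz, hne⟩
          rcases List.mem_cons.mp hz with rfl | hz
          · exact List.mem_cons_self
          · by_cases hzx : z = x
            · subst hzx; exact List.mem_cons_self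
            · exact List.mem_cons_of_mem _
                ((hmem z).mpr ⟨hz, fun hc => hzx (Option.some_inj.mp hc).symm⟩)
      · exact List.pairwise_cons.mpr ⟨fun z hz => hlow z hz x rfl, hpwlt⟩
      · rintro z hz p hp
        have hpx : p ≤ x := hinv x List.mem_cons_self p hp
        have hpx' : p < x := lt_of_le_of_ne hpx (fun hc => h (by rw [hp, hc]))
        rcases List.mem_cons.mp hz with rfl | hz
        · exact hpx'
        · exact lt_trans hpx' (hlow z hz x rfl)

-- sorted(set(L)) is the adjacent-dedup of sorted(L)
theorem pvSorted_ofList_eq_go (L : List String) :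
    PySem.List.sorted (PySem.Set.ofList L) (fun x => x) false
      = pvGo none (PySem.List.sorted L (fun x => x) false) := by
  have hS : (PySem.List.sorted L (fun x => x) false).Pairwise (· ≤ ·) :=
    PySem.List.sorted_pairwise (xs := L) (key := fun x => x)
  obtain ⟨hmem, hpwlt, _⟩ := pvGo_spec (PySem.List.sorted L (fun x => x) false) none hS
    (by rintro y hy p ⟨⟩)
  apply PySem.List.sorted_eq_of_perm_of_pairwise_lt
  · refine (List.perm_ext_iff_of_nodup (hpwlt.imp ne_of_lt) (PySem.Set.nodup_ofList L)).mpr ?_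
    intro z
    rw [hmem z]
    simp [PySem.Set.mem_ofList, PySem.List.mem_sorted]
  · exact hpwlt

-- ===== VERDICT (by name: the statement is the Claim_ definition above) =====
theorem simplify_imports_spec : Claim_equal_simplify_imports := by
  intro imports _
  unfold Spec_simplify_imports simplify_imports simplify_imports_alt
  rw [pvFold_eq_go, List.nil_append,
    show (PySem.Set.empty : PySem.Set String) = PySem.Set.ofList [] from rfl,
    pvSetFold_eq]
  exact pvSorted_ofList_eq_go _
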